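-- pv_equiv track=rewrite | github.com/TaranjyotS/InterviewPrep | coding_questions/technical_questions.py | max_drop_points
-- ===== SOURCE A (Python) =====
-- def max_drop_points(x_coords, y_coords):
--     # Dictionaries to count occurrences of points with the same x and y coordinates
--     x_count = {}
--     y_count = {}
--
--     # Ensure both lists are of the same length
--     if len(x_coords) != len(y_coords):
--         raise ValueError("x and y coordinates must have the same length")
--
--     # Iterate using index, without using zip
--     for i in range(len(x_coords)):
--         x = x_coords[i]
--         y = y_coords[i]
--
--         if x in x_count:
--             x_count[x] += 1
--         else:
--             x_count[x] = 1
--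
--         if y in y_count:
--             y_count[y] += 1
--         else:
--             y_count[y] = 1
--
--     # Filter out any groups with only 1 point
--     max_x_points = max([count for count in x_count.values() if count > 1], default=0)
--     max_y_points = max([count for count in y_count.values() if count > 1], default=0)
--
--     # Return the maximum of the two
--     return max(max_x_points, max_y_points)
-- ===== SOURCE B (Python) =====
-- def max_drop_points(x_coords, y_coords):
--     # Ensure both lists are of the same length
--     if len(x_coords) != len(y_coords):
--         raise ValueError("x and y coordinates must have the same length")
--
--     def longest_run(coords):
--         # sort, then one scan tracking the current run of equal values and the best run
--         best = 0
--         run = 0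
--         prev = None
--         for v in sorted(coords):
--             if run > 0 and v == prev:
--                 run += 1
--             else:
--                 run = 1
--             prev = v
--             if run > best:
--                 best = run
--         # only groups with more than one point count
--         return best if best > 1 else 0
--
--     return max(longest_run(x_coords), longest_run(y_coords))
-- ===== Notes on version B (the rewrite author's own statement) =====
-- stated objective: alternative
-- what changed: Instead of building two count dictionaries and filtering their values, B sorts each list and makes one linear scan over the sorted copy tracking the current run of consecutive equal values and the longest run seen, collapsing a longest run of 1 to 0.
import Mathlib
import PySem

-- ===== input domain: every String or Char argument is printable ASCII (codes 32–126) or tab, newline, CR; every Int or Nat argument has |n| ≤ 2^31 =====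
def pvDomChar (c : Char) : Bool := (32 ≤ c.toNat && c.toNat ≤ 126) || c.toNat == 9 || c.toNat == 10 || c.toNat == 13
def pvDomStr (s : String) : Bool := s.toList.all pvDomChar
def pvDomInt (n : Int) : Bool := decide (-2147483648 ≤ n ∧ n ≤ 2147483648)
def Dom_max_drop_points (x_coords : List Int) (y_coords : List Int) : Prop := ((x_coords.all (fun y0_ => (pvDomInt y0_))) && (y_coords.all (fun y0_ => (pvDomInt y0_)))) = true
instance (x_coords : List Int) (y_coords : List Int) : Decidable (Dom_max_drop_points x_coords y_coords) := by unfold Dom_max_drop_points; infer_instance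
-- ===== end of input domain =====

-- B replaces A's dictionary-counting loop by sort-then-scan: one linear pass over each sorted copy tracking the longest run of equal values (alternative algorithm; not faster).


-- ===== PORT A =====
def max_drop_points (x_coords : List Int) (y_coords : List Int) : Int :=
  -- Python raises ValueError on a length mismatch (excluded by Pre_); the port returns 0 there.
  if x_coords.length ≠ y_coords.length then 0
  else
    let st := (PySem.List.pyRange 0 (x_coords.length : Int)).foldl
      (fun (st : PySem.Dict Int Int × PySem.Dict Int Int) i =>
        let x := PySem.List.pyGetD x_coords i 0
        let y := PySem.List.pyGetD y_coords i 0
        let dx := if st.1.contains x then st.1.insert x (st.1.getD x 0 + 1) else st.1.insert x 1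
        let dy := if st.2.contains y then st.2.insert y (st.2.getD y 0 + 1) else st.2.insert y 1
        (dx, dy))
      (PySem.Dict.empty, PySem.Dict.empty)
    let max_x_points := PySem.List.maxD ((st.1.values).filter (fun c => decide (1 < c))) (fun c => c) 0
    let max_y_points := PySem.List.maxD ((st.2.values).filter (fun c => decide (1 < c))) (fun c => c) 0
    max max_x_points max_y_points

-- ===== PORT B =====
-- the scan step over the sorted list: state is (best, run, prev)
def pv_run_step (st : Int × Int × Option Int) (v : Int) : Int × Int × Option Int :=
  let run := if 0 < st.2.1 ∧ st.2.2 = some v then st.2.1 + 1 else 1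
  let best := if st.1 < run then run else st.1
  (best, run, some v)

def pv_longest_run (coords : List Int) : Int :=
  let st := (PySem.List.sorted coords (fun v => v) false).foldl pv_run_step (0, 0, none)
  if 1 < st.1 then st.1 else 0

def max_drop_points_alt (x_coords : List Int) (y_coords : List Int) : Int :=
  -- Python raises ValueError on a length mismatch (excluded by Pre_); the port returns 0 there.
  if x_coords.length ≠ y_coords.length then 0
  else max (pv_longest_run x_coords) (pv_longest_run y_coords)

-- ===== PRECONDITION & SPEC =====
-- Pre_ excludes exactly the inputs where both Pythons raise ValueError: mismatched lengths.
def Pre_max_drop_points (x_coords : List Int) (y_coords : List Int) : Prop :=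
  x_coords.length = y_coords.length
instance (x_coords : List Int) (y_coords : List Int) : Decidable (Pre_max_drop_points x_coords y_coords) := by unfold Pre_max_drop_points; infer_instance
def pvWitness_max_drop_points : List Int × List Int := ([1, 1, 2], [3, 4, 5])

def Spec_max_drop_points (x_coords : List Int) (y_coords : List Int) (out : Int) : Prop := out = max_drop_points_alt x_coords y_coords
instance (x_coords : List Int) (y_coords : List Int) (out : Int) : Decidable (Spec_max_drop_points x_coords y_coords out) := by unfold Spec_max_drop_points; infer_instance

-- ===== CLAIM (what is proved, stated in full; the proofs are below) =====
def Claim_equal_max_drop_points : Prop := ∀ (x_coords : List Int) (y_coords : List Int), Dom_max_drop_points x_coords y_coords → Pre_max_drop_points x_coords y_coords → Spec_max_drop_points x_coords y_coords (max_drop_points x_coords y_coords)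

-- ===== LEMMAS AND PROOFS =====

-- the common yardstick: the largest multiplicity in l, collapsed to 0 when ≤ 1
def pv_M (l : List Int) : Int :=
  PySem.List.maxD ((PySem.Set.ofList l).map (fun v => (List.count v l : Int))) (fun c => c) 0

-- A's if-contains counting step is the insert-getD step.
lemma pv_step_eq (d : PySem.Dict Int Int) (x : Int) :
    (if d.contains x then d.insert x (d.getD x 0 + 1) else d.insert x 1)
      = d.insert x (d.getD x 0 + 1) := by
  by_cases h : d.contains x = true
  · simp [h]
  · have h0 : d.getD x 0 = 0 :=
      PySem.Dict.getD_of_not_contains d 0 (by simpa using h)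
    simp [h, h0]

-- folding over a zip while using only the first components is folding over the first list
lemma pv_foldl_zip_fst {σ : Type} (xs ys : List Int) (h : xs.length ≤ ys.length)
    (f : σ → Int → σ) (init : σ) :
    (xs.zip ys).foldl (fun s e => f s e.1) init = xs.foldl f init := by
  conv_rhs => rw [← List.map_fst_zip (l₁ := xs) (l₂ := ys) h]
  rw [List.foldl_map]

lemma pv_foldl_zip_snd {σ : Type} (xs ys : List Int) (h : ys.length ≤ xs.length)
    (f : σ → Int → σ) (init : σ) :
    (xs.zip ys).foldl (fun s e => f s e.2) init = ys.foldl f init := by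
  conv_rhs => rw [← List.map_snd_zip (l₁ := xs) (l₂ := ys) h]
  rw [List.foldl_map]

-- A's double-index loop over two equal-length lists builds the two counters.
lemma pv_loop_eq (xs ys : List Int) (hlen : xs.length = ys.length) :
    (PySem.List.pyRange 0 (xs.length : Int)).foldl
      (fun (st : PySem.Dict Int Int × PySem.Dict Int Int) i =>
        let x := PySem.List.pyGetD xs i 0
        let y := PySem.List.pyGetD ys i 0
        let dx := if st.1.contains x then st.1.insert x (st.1.getD x 0 + 1) else st.1.insert x 1
        let dy := if st.2.contains y then st.2.insert y (st.2.getD y 0 + 1) else st.2.insert y 1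
        (dx, dy))
      (PySem.Dict.empty, PySem.Dict.empty)
    = (PySem.Dict.counter xs, PySem.Dict.counter ys) := by
  have hb : (xs.length : Int) = ((xs.zip ys).length : Int) := by
    simp [List.length_zip, hlen]
  rw [hb]
  rw [PySem.List.foldl_congr_mem _ _
      (fun (st : PySem.Dict Int Int × PySem.Dict Int Int) i =>
        (fun (st : PySem.Dict Int Int × PySem.Dict Int Int) (e : Int × Int) =>
          ((if st.1.contains e.1 then st.1.insert e.1 (st.1.getD e.1 0 + 1) else st.1.insert e.1 1),
           (if st.2.contains e.2 then st.2.insert e.2 (st.2.getD e.2 0 + 1) else st.2.insert e.2 1)))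
          st (PySem.List.pyGetD (xs.zip ys) i (0, 0))) _ ?_]
  · rw [PySem.List.foldl_pyRange_zero_pyGetD' (xs.zip ys) (0, 0)
        (fun (st : PySem.Dict Int Int × PySem.Dict Int Int) (e : Int × Int) =>
          ((if st.1.contains e.1 then st.1.insert e.1 (st.1.getD e.1 0 + 1) else st.1.insert e.1 1),
           (if st.2.contains e.2 then st.2.insert e.2 (st.2.getD e.2 0 + 1) else st.2.insert e.2 1)))
        (PySem.Dict.empty, PySem.Dict.empty)]
    rw [PySem.List.foldl_prod_mk
        (f := fun (d : PySem.Dict Int Int) (e : Int × Int) =>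
          if d.contains e.1 then d.insert e.1 (d.getD e.1 0 + 1) else d.insert e.1 1)
        (g := fun (d : PySem.Dict Int Int) (e : Int × Int) =>
          if d.contains e.2 then d.insert e.2 (d.getD e.2 0 + 1) else d.insert e.2 1)]
    rw [pv_foldl_zip_fst xs ys hlen.le
        (fun (d : PySem.Dict Int Int) (x : Int) =>
          if d.contains x = true then d.insert x (d.getD x 0 + 1) else d.insert x 1)
        PySem.Dict.empty]
    rw [pv_foldl_zip_snd xs ys hlen.ge
        (fun (d : PySem.Dict Int Int) (y : Int) =>
          if d.contains y = true then d.insert y (d.getD y 0 + 1) else d.insert y 1)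
        PySem.Dict.empty]
    simp only [pv_step_eq]
    rw [PySem.Dict.foldl_insert_getD_add_one_eq_counter xs,
        PySem.Dict.foldl_insert_getD_add_one_eq_counter ys]
  · intro st i hi
    obtain ⟨h0, h1⟩ := PySem.List.mem_pyRange_one.mp hi
    have hiz : i.toNat < (xs.zip ys).length := by omega
    have hix : i.toNat < xs.length := by
      simp only [List.length_zip, hlen, min_self] at hiz; omega
    have hiy : i.toNat < ys.length := by omega
    have hze : PySem.List.pyGetD (xs.zip ys) i (0, 0) = (xs.zip ys)[i.toNat] :=
      PySem.List.pyGetD_eq_getElem _ _ h0 (by omega)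
    have hxe : PySem.List.pyGetD xs i 0 = xs[i.toNat] :=
      PySem.List.pyGetD_eq_getElem _ _ h0 (by omega)
    have hye : PySem.List.pyGetD ys i 0 = ys[i.toNat] :=
      PySem.List.pyGetD_eq_getElem _ _ h0 (by omega)
    simp only [hze, hxe, hye, List.getElem_zip]

-- the values of counter l are the counts of the distinct values of l
lemma pv_values_counter (l : List Int) :
    (PySem.Dict.counter l).values
      = (PySem.Set.ofList l).map (fun v => (List.count v l : Int)) := by
  simp only [PySem.Dict.values, PySem.Dict.items_counter, List.map_map]
  rfl

lemma pv_maxD_nil (d : Int) : PySem.List.maxD ([] : List Int) (fun c => c) d = d := rfl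

-- max of the elements > 1 (default 0) over a list of elements ≥ 1 is the overall max, collapsed to 0 when ≤ 1
lemma pv_max_filter (L : List Int) (hpos : ∀ c ∈ L, 1 ≤ c) :
    PySem.List.maxD (L.filter (fun c => decide (1 < c))) (fun c => c) 0
      = (if 1 < PySem.List.maxD L (fun c => c) 0 then PySem.List.maxD L (fun c => c) 0 else 0) := by
  cases hM : PySem.List.max? L (fun c => c) with
  | none =>
      have : L = [] := (PySem.List.max?_eq_none_iff L _).mp hM
      subst this
      simp [PySem.List.maxD, PySem.List.max?]
  | some M =>
      have hMem : M ∈ L := PySem.List.max?_mem hM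
      have hub : ∀ y ∈ L, y ≤ M := by
        intro y hy; exact PySem.List.max?_isMax hM y hy
      have h1M : 1 ≤ M := hpos M hMem
      have hLD : PySem.List.maxD L (fun c => c) 0 = M := by
        simp [PySem.List.maxD, hM]
      rw [hLD]
      by_cases hgt : 1 < M
      · have hMF : M ∈ L.filter (fun c => decide (1 < c)) :=
          List.mem_filter.mpr ⟨hMem, by simpa using hgt⟩
        cases hF : PySem.List.max? (L.filter (fun c => decide (1 < c))) (fun c => c) with
        | none =>
            exfalso
            have := (PySem.List.max?_eq_none_iff _ _).mp hF
            rw [this] at hMF; exact (List.not_mem_nil) hMF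
        | some M' =>
            have hM'F : M' ∈ L.filter (fun c => decide (1 < c)) := PySem.List.max?_mem hF
            have hM'L : M' ∈ L := (List.mem_filter.mp hM'F).1
            have h1 : M' ≤ M := hub _ hM'L
            have h2 : M ≤ M' := PySem.List.max?_isMax hF M hMF
            have : M' = M := le_antisymm h1 h2
            simp [PySem.List.maxD, hF, this, hgt]
      · have hM1 : M = 1 := le_antisymm (by omega) h1M
        have hfe : L.filter (fun c => decide (1 < c)) = [] := by
          apply List.filter_eq_nil_iff.mpr
          intro c hc
          have := hub c hc
          have := hpos c hc
          simp; omega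
        rw [hfe, pv_maxD_nil]
        simp [hgt]

-- the A-side per-list result over the counter's values
lemma pv_side_A (l : List Int) :
    PySem.List.maxD (((PySem.Dict.counter l).values).filter (fun c => decide (1 < c))) (fun c => c) 0
      = (if 1 < pv_M l then pv_M l else 0) := by
  rw [pv_values_counter]
  have hpos : ∀ c ∈ (PySem.Set.ofList l).map (fun v => (List.count v l : Int)), 1 ≤ c := by
    intro c hc
    obtain ⟨v, hv, rfl⟩ := List.mem_map.mp hc
    have hvl : v ∈ l := (PySem.Set.mem_ofList l v).mp hv
    have : 1 ≤ List.count v l := List.one_le_count_iff.mpr hvl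
    exact_mod_cast this
  rw [pv_max_filter _ hpos]
  rfl

-- every member of a ≤-sorted list is at most its last element
lemma pv_mem_le_getLast (t : List Int) (l v : Int) (h : t.Pairwise (· ≤ ·))
    (hl : t.getLast? = some l) (hv : v ∈ t) : v ≤ l := by
  obtain ⟨t', rfl⟩ := List.getLast?_eq_some_iff.mp hl
  rcases List.mem_append.mp hv with hv' | hv'
  · exact (List.pairwise_append.mp h).2.2 v hv' l (by simp)
  · simp at hv'; omega

-- appending one element bumps exactly its own count
lemma pv_count_app (u v : Int) (t : List Int) :
    (List.count u (t ++ [v]) : Int) = (List.count u t : Int) + (if v = u then 1 else 0) := by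
  by_cases h : v = u <;> simp [List.count_append, h]

-- the invariant of B's scan: over a ≤-sorted list s the state is
-- (best, count of the last element, last element), where best is some multiplicity
-- and an upper bound of all multiplicities.
lemma pv_scan_spec (s : List Int) (hs : s.Pairwise (· ≤ ·)) :
    (s = [] ∧ s.foldl pv_run_step (0, 0, none) = (0, 0, none)) ∨
    (∃ l B, s.getLast? = some l ∧
      s.foldl pv_run_step (0, 0, none) = (B, (List.count l s : Int), some l) ∧
      (∃ w ∈ s, B = (List.count w s : Int)) ∧
      (∀ w ∈ s, (List.count w s : Int) ≤ B)) := by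
  induction s using List.reverseRecOn with
  | nil => left; exact ⟨rfl, rfl⟩
  | append_singleton t v ih =>
    right
    have hst : t.Pairwise (· ≤ ·) := (List.pairwise_append.mp hs).1
    have hle : ∀ w ∈ t, w ≤ v := by
      intro w hw
      exact (List.pairwise_append.mp hs).2.2 w hw v (List.mem_singleton_self v)
    rw [List.foldl_append, List.foldl_cons, List.foldl_nil]
    rcases ih hst with ⟨ht, hfold⟩ | ⟨l, B, hlast, hfold, ⟨w, hwmem, hwB⟩, hub⟩
    · subst ht
      refine ⟨v, 1, by simp, ?_, ⟨v, by simp, by simp⟩, ?_⟩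
      · simp [pv_run_step]
      · intro w hw
        simp only [List.nil_append, List.mem_singleton] at hw
        subst hw; simp
    · have hlmem : l ∈ t := List.mem_of_getLast? hlast
      have hB1 : (1 : Int) ≤ B := by
        have h1 : 1 ≤ List.count w t := List.one_le_count_iff.mpr hwmem
        omega
      rw [hfold]
      by_cases hvl : l = v
      · -- the run of l continues
        subst hvl
        have hpos : (0 : Int) < (List.count l t : Int) := by
          exact_mod_cast List.count_pos_iff.mpr hlmem
        have hcnt : (List.count l (t ++ [l]) : Int) = (List.count l t : Int) + 1 := by
          rw [pv_count_app]; simp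
        have hrun : pv_run_step (B, (List.count l t : Int), some l) l
            = (max B ((List.count l t : Int) + 1), (List.count l t : Int) + 1, some l) := by
          simp only [pv_run_step, hpos, and_self, if_true]
          by_cases hB : B < (List.count l t : Int) + 1 <;> simp [hB] <;> omega
        refine ⟨l, max B ((List.count l t : Int) + 1), by simp, by rw [hrun, hcnt], ?_, ?_⟩
        · by_cases hc : B ≤ (List.count l t : Int) + 1
          · exact ⟨l, by simp, by rw [hcnt]; omega⟩
          · refine ⟨w, List.mem_append_left _ hwmem, ?_⟩
            have hwne : l ≠ w := by
              intro h; subst h; omega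
            rw [pv_count_app, if_neg hwne]
            omega
        · intro u hu
          rw [pv_count_app]
          by_cases huv : l = u
          · subst huv; simp
          · have hut : u ∈ t := by
              rcases List.mem_append.mp hu with h | h
              · exact h
              · simp at h; exact absurd h.symm huv
            have := hub u hut
            simp [huv]; omega
      · -- a new, strictly larger value: it cannot occur in t
        have hvt : v ∉ t := by
          intro hv
          exact hvl (le_antisymm (hle l hlmem) (pv_mem_le_getLast t l v hst hlast hv))
        have hc0 : List.count v t = 0 := List.count_eq_zero_of_not_mem hvt
        have hrun : pv_run_step (B, (List.count l t : Int), some l) v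
            = (B, 1, some v) := by
          have hne : ¬ (0 < (List.count l t : Int) ∧ (some l : Option Int) = some v) := by
            rintro ⟨-, h⟩; exact hvl (Option.some.inj h)
          simp only [pv_run_step, if_neg hne]
          have : ¬ (B < (1 : Int)) := by omega
          simp [this]
        have hcv : (List.count v (t ++ [v]) : Int) = 1 := by
          rw [pv_count_app]; simp [hc0]
        refine ⟨v, B, by simp, by rw [hrun, hcv], ?_, ?_⟩
        · refine ⟨w, List.mem_append_left _ hwmem, ?_⟩
          have hwv : v ≠ w := fun h => hvt (h ▸ hwmem)
          rw [pv_count_app, if_neg hwv]; omega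
        · intro u hu
          rw [pv_count_app]
          by_cases huv : v = u
          · subst huv; simp [hc0]; omega
          · have hut : u ∈ t := by
              rcases List.mem_append.mp hu with h | h
              · exact h
              · simp at h; exact absurd h.symm huv
            have := hub u hut
            simp [huv]; omega

-- B's scan over the sorted copy computes the collapsed maximal multiplicity
lemma pv_side_B (l : List Int) :
    pv_longest_run l = (if 1 < pv_M l then pv_M l else 0) := by
  unfold pv_longest_run
  have hperm : (PySem.List.sorted l (fun v => v) false).Perm l := PySem.List.sorted_perm l (fun v => v) false
  have hp : (PySem.List.sorted l (fun v => v) false).Pairwise (· ≤ ·) :=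
    PySem.List.sorted_pairwise l (fun v => v)
  rcases pv_scan_spec _ hp with ⟨hnil, hfold⟩ | ⟨lst, B, _, hfold, ⟨w, hwmem, hwB⟩, hub⟩
  · have hl : l = [] := by
      have := hperm; rw [hnil] at this
      exact (List.Perm.nil_eq this).symm
    subst hl
    rw [hfold]
    rfl
  · rw [hfold]
    have hBM : B = pv_M l := by
      have hwl : w ∈ l := hperm.mem_iff.mp hwmem
      have hcw : List.count w (PySem.List.sorted l (fun v => v) false) = List.count w l :=
        hperm.count_eq w
      cases hM : PySem.List.max?
          ((PySem.Set.ofList l).map (fun v => (List.count v l : Int))) (fun c => c) with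
      | none =>
          exfalso
          have hLnil := (PySem.List.max?_eq_none_iff _ _).mp hM
          have : List.count w l ∈ ([] : List Nat) := by
            have hset : w ∈ PySem.Set.ofList l := (PySem.Set.mem_ofList l w).mpr hwl
            have : ((List.count w l : Int)) ∈
                (PySem.Set.ofList l).map (fun v => (List.count v l : Int)) :=
              List.mem_map.mpr ⟨w, hset, rfl⟩
            rw [hLnil] at this; exact absurd this List.not_mem_nil
          exact absurd this List.not_mem_nil
      | some M =>
          have hMval : pv_M l = M := by simp [pv_M, PySem.List.maxD, hM]
          have hMmem := PySem.List.max?_mem hM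
          obtain ⟨u, huset, huM⟩ := List.mem_map.mp hMmem
          have hul : u ∈ l := (PySem.Set.mem_ofList l u).mp huset
          have hus : u ∈ PySem.List.sorted l (fun v => v) false := hperm.mem_iff.mpr hul
          have h1 : M ≤ B := by
            have := hub u hus
            rw [hperm.count_eq u] at this
            omega
          have h2 : B ≤ M := by
            have hset : w ∈ PySem.Set.ofList l := (PySem.Set.mem_ofList l w).mpr hwl
            have hmem : ((List.count w l : Int)) ∈
                (PySem.Set.ofList l).map (fun v => (List.count v l : Int)) :=
              List.mem_map.mpr ⟨w, hset, rfl⟩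
            have := PySem.List.max?_isMax hM _ hmem
            rw [hwB, hcw]
            exact this
          rw [hMval]; omega
    rw [hBM]

-- ===== VERDICT (by name: the statement is the Claim_ definition above) =====
theorem max_drop_points_spec : Claim_equal_max_drop_points := by
  intro xs ys _ hpre
  unfold Spec_max_drop_points max_drop_points max_drop_points_alt
  rw [pv_loop_eq xs ys hpre]
  dsimp only
  rw [pv_side_A xs, pv_side_A ys, ← pv_side_B xs, ← pv_side_B ys]
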